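-- pv_equiv track=rewrite | github.com/ShengHao-Shi/Polygon_to_Centerline | pure_centerline/centerline_pure.py | _split_at_depth
-- ===== SOURCE A (Python) =====
-- def _split_at_depth(text: str, depth: int) -> list:
--     """
--     Split *text* at commas that are at exactly *depth* levels of nested
--     parentheses (depth 0 = outside all parentheses).
--
--     Returns a list of stripped, non-empty sub-strings.
--     """
--     result = []
--     current: list = []
--     d = 0
--     for ch in text:
--         if ch == "(":
--             d += 1
--             current.append(ch)
--         elif ch == ")":
--             d -= 1
--             current.append(ch)
--         elif ch == "," and d == depth:
--             result.append("".join(current).strip())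
--             current = []
--         else:
--             current.append(ch)
--     if current:
--         result.append("".join(current).strip())
--     return [s for s in result if s]
-- ===== SOURCE B (Python) =====
-- def _split_at_depth(text: str, depth: int) -> list:
--     """
--     Split *text* at commas that are at exactly *depth* levels of nested
--     parentheses.  Two-pass: first collect the cut positions, then slice.
--     """
--     d = 0
--     cuts = []
--     for i, ch in enumerate(text):
--         if ch == "(":
--             d += 1
--         elif ch == ")":
--             d -= 1
--         elif ch == "," and d == depth:
--             cuts.append(i)
--     bounds = [-1] + cuts + [len(text)]
--     parts = [text[i + 1:j].strip() for i, j in zip(bounds, bounds[1:])]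
--     return [p for p in parts if p]
-- ===== Notes on version B (the rewrite author's own statement) =====
-- stated objective: alternative
-- what changed: A accumulates a character buffer and emits a stripped segment at each cut during one scan; B first scans only to collect the indices of commas at the given depth, then builds each segment by slicing the text between consecutive boundaries, stripping and dropping empties.
import Mathlib
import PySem

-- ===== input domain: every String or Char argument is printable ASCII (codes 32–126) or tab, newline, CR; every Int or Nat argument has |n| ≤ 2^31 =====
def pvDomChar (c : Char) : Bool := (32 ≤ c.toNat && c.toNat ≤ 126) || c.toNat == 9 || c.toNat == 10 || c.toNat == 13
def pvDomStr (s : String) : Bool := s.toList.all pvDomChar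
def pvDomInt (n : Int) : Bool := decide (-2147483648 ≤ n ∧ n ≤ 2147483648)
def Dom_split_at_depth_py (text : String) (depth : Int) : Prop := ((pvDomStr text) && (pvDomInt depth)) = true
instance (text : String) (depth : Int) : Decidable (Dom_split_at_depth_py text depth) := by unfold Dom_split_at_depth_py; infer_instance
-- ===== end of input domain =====

-- B replaces A's character-buffer accumulation by a two-pass decomposition (collect comma
-- cut positions at the given depth, then slice the text between consecutive boundaries);
-- objective: alternative decomposition, same O(n) cost.

-- ===== PORT A =====
-- the for-loop of A as structural recursion over the remaining characters with the
-- same state (d, current, result); ''.join(current).strip() is String.ofList ∘ Chars.strip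
def pvLoopA (depth : Int) : List Char → Int → List Char → List String → List String
  | [], _, cur, res =>
      if cur = [] then res else res ++ [String.ofList (PySem.Chars.strip cur)]
  | c :: l, d, cur, res =>
      if c = '(' then pvLoopA depth l (d + 1) (cur ++ [c]) res
      else if c = ')' then pvLoopA depth l (d - 1) (cur ++ [c]) res
      else if c = ',' ∧ d = depth then
        pvLoopA depth l d [] (res ++ [String.ofList (PySem.Chars.strip cur)])
      else pvLoopA depth l d (cur ++ [c]) res

def split_at_depth_py (text : String) (depth : Int) : List String :=
  (pvLoopA depth text.toList 0 [] []).filter (fun s => s != "")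

-- ===== PORT B =====
-- first pass of Source B: the indices (as Python ints) of commas seen at depth `depth`
def pvCutsB (depth : Int) : List Char → Int → Int → List Int
  | [], _, _ => []
  | c :: l, d, i =>
      if c = '(' then pvCutsB depth l (d + 1) (i + 1)
      else if c = ')' then pvCutsB depth l (d - 1) (i + 1)
      else if c = ',' ∧ d = depth then i :: pvCutsB depth l d (i + 1)
      else pvCutsB depth l d (i + 1)

def split_at_depth_py_alt (text : String) (depth : Int) : List String :=
  let l := text.toList
  let bounds : List Int := [-1] ++ pvCutsB depth l 0 0 ++ [(l.length : Int)]
  let parts := (bounds.zip bounds.tail).map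
    (fun p => String.ofList (PySem.Chars.strip (PySem.List.slice l (some (p.1 + 1)) (some p.2))))
  parts.filter (fun s => s != "")

-- ===== PRECONDITION & SPEC =====
def Spec_split_at_depth_py (text : String) (depth : Int) (out : List String) : Prop := out = split_at_depth_py_alt text depth
instance (text : String) (depth : Int) (out : List String) : Decidable (Spec_split_at_depth_py text depth out) := by unfold Spec_split_at_depth_py; infer_instance

-- ===== CLAIM (what is proved, stated in full; the proofs are below) =====
def Claim_equal_split_at_depth_py : Prop := ∀ (text : String) (depth : Int), Dom_split_at_depth_py text depth → Spec_split_at_depth_py text depth (split_at_depth_py text depth)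

-- ===== LEMMAS AND PROOFS =====

-- the raw (unstripped) segments the split produces, recursively
def pvSplitRaw (depth : Int) : List Char → Int → List (List Char)
  | [], _ => [[]]
  | c :: l, d =>
      if c = '(' then
        match pvSplitRaw depth l (d + 1) with
        | [] => [[c]]
        | h :: t => (c :: h) :: t
      else if c = ')' then
        match pvSplitRaw depth l (d - 1) with
        | [] => [[c]]
        | h :: t => (c :: h) :: t
      else if c = ',' ∧ d = depth then [] :: pvSplitRaw depth l d
      else
        match pvSplitRaw depth l d with
        | [] => [[c]]
        | h :: t => (c :: h) :: t

lemma pvSplitRaw_ne_nil (depth : Int) (l : List Char) (d : Int) :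
    pvSplitRaw depth l d ≠ [] := by
  cases l with
  | nil => simp [pvSplitRaw]
  | cons c l =>
    simp only [pvSplitRaw]
    split_ifs with h1 h2 h3
    · cases h : pvSplitRaw depth l (d + 1) <;> simp
    · cases h : pvSplitRaw depth l (d - 1) <;> simp
    · simp
    · cases h : pvSplitRaw depth l d <;> simp

-- glue cur onto the first raw segment
def pvGlue (cur : List Char) : List (List Char) → List (List Char)
  | [] => [cur]
  | h :: t => (cur ++ h) :: t

-- what A's end-of-loop produces from raw segments: strip each, drop the last if raw-empty
def pvFinalize : List (List Char) → List String
  | [] => []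
  | [s] => if s = [] then [] else [String.ofList (PySem.Chars.strip s)]
  | s :: t => String.ofList (PySem.Chars.strip s) :: pvFinalize t

lemma pvLoopA_eq (depth : Int) :
    ∀ (l : List Char) (d : Int) (cur : List Char) (res : List String),
      pvLoopA depth l d cur res = res ++ pvFinalize (pvGlue cur (pvSplitRaw depth l d)) := by
  intro l
  induction l with
  | nil =>
    intro d cur res
    simp only [pvLoopA, pvSplitRaw, pvGlue, pvFinalize, List.append_nil]
    split_ifs with h <;> simp
  | cons c l ih =>
    intro d cur res
    simp only [pvLoopA, pvSplitRaw]
    split_ifs with h1 h2 h3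
    · rw [ih]
      cases h : pvSplitRaw depth l (d + 1) with
      | nil => exact absurd h (pvSplitRaw_ne_nil depth l (d + 1))
      | cons s t => simp [pvGlue]
    · rw [ih]
      cases h : pvSplitRaw depth l (d - 1) with
      | nil => exact absurd h (pvSplitRaw_ne_nil depth l (d - 1))
      | cons s t => simp [pvGlue]
    · rw [ih]
      cases h : pvSplitRaw depth l d with
      | nil => exact absurd h (pvSplitRaw_ne_nil depth l d)
      | cons s t => simp [pvGlue, pvFinalize]
    · rw [ih]
      cases h : pvSplitRaw depth l d with
      | nil => exact absurd h (pvSplitRaw_ne_nil depth l d)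
      | cons s t => simp [pvGlue]

lemma pvFinalize_filter (P : String → Bool) (hP : P "" = false) :
    ∀ segs : List (List Char),
      (pvFinalize segs).filter P
        = ((segs.map (fun s => String.ofList (PySem.Chars.strip s))).filter P) := by
  intro segs
  induction segs with
  | nil => simp [pvFinalize]
  | cons s t ih =>
    cases t with
    | nil =>
      simp only [pvFinalize, List.map, List.filter]
      split_ifs with h
      · subst h
        have : String.ofList (PySem.Chars.strip ([] : List Char)) = "" := by decide
        simp [this, hP, List.filter]
      · simp [List.filter]
    | cons s' t' =>
      simp only [pvFinalize, List.map, List.filter] at *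
      rw [ih]

-- adjacent pairs of a list ( = zip bs bs.tail )
def pvPairs {α : Type} : List α → List (α × α)
  | a :: b :: r => (a, b) :: pvPairs (b :: r)
  | _ => []

lemma pvZip_tail_eq_pairs {α : Type} : ∀ bs : List α, bs.zip bs.tail = pvPairs bs := by
  intro bs
  match bs with
  | [] => rfl
  | [a] => rfl
  | a :: b :: r =>
    simp only [List.zip, List.tail, pvPairs]
    have := pvZip_tail_eq_pairs (b :: r)
    simpa [List.zip] using this

-- the slices B takes between consecutive boundaries
def pvSegs (L : List Char) (bs : List Int) : List (List Char) :=
  (pvPairs bs).map (fun p => PySem.List.slice L (some (p.1 + 1)) (some p.2))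

lemma pvSegs_cons (L : List Char) (a b : Int) (r : List Int) :
    pvSegs L (a :: b :: r)
      = PySem.List.slice L (some (a + 1)) (some b) :: pvSegs L (b :: r) := by
  simp [pvSegs, pvPairs]

lemma pvCutsB_ge (depth : Int) :
    ∀ (l : List Char) (d i j : Int), j ∈ pvCutsB depth l d i → i ≤ j := by
  intro l
  induction l with
  | nil => intro d i j h; simp [pvCutsB] at h
  | cons c l ih =>
    intro d i j h
    simp only [pvCutsB] at h
    split_ifs at h with h1 h2 h3
    · have := ih (d + 1) (i + 1) j h; omega
    · have := ih (d - 1) (i + 1) j h; omega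
    · rcases List.mem_cons.mp h with rfl | h
      · omega
      · have := ih d (i + 1) j h; omega
    · have := ih d (i + 1) j h; omega

-- slicing one more character off the front
lemma pvSlice_cons (L : List Char) (n : Nat) (c : Char) (l : List Char) (b : Int)
    (hd : L.drop n = c :: l) (hb : (n : Int) + 1 ≤ b) :
    PySem.List.slice L (some (n : Int)) (some b)
      = c :: PySem.List.slice L (some ((n : Int) + 1)) (some b) := by
  have hb0 : 0 ≤ b := by omega
  obtain ⟨m, rfl⟩ : ∃ m : Nat, b = (m : Int) := ⟨b.toNat, by omega⟩
  have hm : n + 1 ≤ m := by exact_mod_cast hb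
  have h1 : ((n : Int) + 1) = ((n + 1 : Nat) : Int) := by push_cast; ring
  rw [h1, PySem.List.slice_natCast, PySem.List.slice_natCast]
  have hdrop : L.drop (n + 1) = l := by
    have : L.drop (n + 1) = (L.drop n).drop 1 := by
      rw [List.drop_drop]
    rw [this, hd]; rfl
  rw [hd, hdrop]
  have h2 : m - n = (m - (n + 1)) + 1 := by omega
  rw [h2]
  rfl

-- one non-cut character: slice boundaries shift by one, segment gains c in front
lemma pvConsStep (depth : Int) (L : List Char) (l : List Char) (d' : Int) (n : Nat) (a : Int)
    (c : Char) (ha : a + 1 = (n : Int)) (hd : L.drop n = c :: l) (hn : n < L.length)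
    (hd' : L.drop (n + 1) = l)
    (ih : ∀ (m : Nat) (am : Int), am + 1 = (m : Int) → L.drop m = l →
      pvSegs L (am :: (pvCutsB depth l d' (m : Int) ++ [(L.length : Int)]))
        = pvSplitRaw depth l d') :
    pvSegs L (a :: (pvCutsB depth l d' ((n : Int) + 1) ++ [(L.length : Int)]))
      = match pvSplitRaw depth l d' with
        | [] => [[c]]
        | h :: t => (c :: h) :: t := by
  have hcast : ((n : Int) + 1) = ((n + 1 : Nat) : Int) := by push_cast; ring
  obtain ⟨b₁, rest, hbr⟩ : ∃ b₁ rest,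
      pvCutsB depth l d' ((n : Int) + 1) ++ [(L.length : Int)] = b₁ :: rest := by
    cases h : pvCutsB depth l d' ((n : Int) + 1) with
    | nil => exact ⟨(L.length : Int), [], by simp⟩
    | cons x xs => exact ⟨x, xs ++ [(L.length : Int)], by simp⟩
  have hb₁ : (n : Int) + 1 ≤ b₁ := by
    cases h : pvCutsB depth l d' ((n : Int) + 1) with
    | nil =>
      rw [h] at hbr
      simp only [List.nil_append, List.cons.injEq] at hbr
      rw [← hbr.1]
      exact_mod_cast (by omega : ((n + 1 : Nat) : Int) ≤ (L.length : Int))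
    | cons x xs =>
      rw [h] at hbr
      simp only [List.cons_append, List.cons.injEq] at hbr
      obtain ⟨rfl, -⟩ := hbr
      exact pvCutsB_ge depth l d' ((n : Int) + 1) _ (by rw [h]; exact List.mem_cons_self ..)
  have hIH := ih (n + 1) ((n : Int)) (by push_cast; ring) hd'
  rw [← hcast] at hIH
  rw [hbr] at hIH ⊢
  rw [pvSegs_cons] at hIH ⊢
  cases hsr : pvSplitRaw depth l d' with
  | nil => exact absurd hsr (pvSplitRaw_ne_nil depth l d')
  | cons h t =>
    rw [hsr] at hIH
    injection hIH with hh ht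
    rw [ha, ht, ← hh]
    rw [pvSlice_cons L n c l b₁ hd hb₁]

-- main B-side lemma: the slices between the boundaries are exactly the raw segments
lemma pvSegs_eq_splitRaw (depth : Int) (L : List Char) :
    ∀ (l : List Char) (d : Int) (n : Nat) (a : Int), a + 1 = (n : Int) → L.drop n = l →
      pvSegs L (a :: (pvCutsB depth l d (n : Int) ++ [(L.length : Int)]))
        = pvSplitRaw depth l d := by
  intro l
  induction l with
  | nil =>
    intro d n a ha hd
    simp only [pvCutsB, List.nil_append, pvSplitRaw]
    rw [pvSegs_cons, ha]
    have h2 : pvSegs L [(L.length : Int)] = [] := by simp [pvSegs, pvPairs]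
    rw [h2, PySem.List.slice_natCast, hd]
    simp
  | cons c l ih =>
    intro d n a ha hd
    have hn : n < L.length := by
      by_contra h
      rw [List.drop_eq_nil_of_le (by omega)] at hd
      exact List.cons_ne_nil _ _ hd.symm
    have hcast : ((n : Int) + 1) = ((n + 1 : Nat) : Int) := by push_cast; ring
    have hd' : L.drop (n + 1) = l := by
      have h1 : L.drop (n + 1) = (L.drop n).drop 1 := by rw [List.drop_drop]
      rw [h1, hd]; rfl
    simp only [pvCutsB, pvSplitRaw]
    split_ifs with h1 h2 h3
    · exact pvConsStep depth L l (d + 1) n a c ha hd hn hd'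
        (fun m am ham hdm => ih (d + 1) m am ham hdm)
    · exact pvConsStep depth L l (d - 1) n a c ha hd hn hd'
        (fun m am ham hdm => ih (d - 1) m am ham hdm)
    · -- comma at the right depth: a cut at index n
      rw [List.cons_append, pvSegs_cons, ha]
      have htail := ih d (n + 1) ((n : Int)) (by push_cast; ring) hd'
      rw [← hcast] at htail
      rw [htail]
      have hempty : PySem.List.slice L (some ((n : Int))) (some ((n : Int))) = [] := by
        rw [PySem.List.slice_natCast]; simp
      rw [hempty]
    · exact pvConsStep depth L l d n a c ha hd hn hd'
        (fun m am ham hdm => ih d m am ham hdm)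

-- ===== VERDICT (by name: the statement is the Claim_ definition above) =====
theorem split_at_depth_py_spec : Claim_equal_split_at_depth_py := by
  intro text depth _
  unfold Spec_split_at_depth_py split_at_depth_py split_at_depth_py_alt
  simp only []
  rw [pvLoopA_eq]
  simp only [List.nil_append]
  have hglue : pvGlue [] (pvSplitRaw depth text.toList 0) = pvSplitRaw depth text.toList 0 := by
    cases h : pvSplitRaw depth text.toList 0 with
    | nil => exact absurd h (pvSplitRaw_ne_nil depth text.toList 0)
    | cons s t => simp [pvGlue]
  rw [hglue, pvFinalize_filter _ (by decide)]
  rw [pvZip_tail_eq_pairs]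
  have hmap : (pvPairs ([-1] ++ pvCutsB depth text.toList 0 0 ++ [(text.toList.length : Int)])).map
        (fun p => String.ofList (PySem.Chars.strip
          (PySem.List.slice text.toList (some (p.1 + 1)) (some p.2))))
      = (pvSegs text.toList ([-1] ++ pvCutsB depth text.toList 0 0 ++ [(text.toList.length : Int)])).map
        (fun s => String.ofList (PySem.Chars.strip s)) := by
    simp [pvSegs, List.map_map, Function.comp]
  rw [hmap]
  have hseg : pvSegs text.toList ([-1] ++ pvCutsB depth text.toList 0 0 ++ [(text.toList.length : Int)])
      = pvSplitRaw depth text.toList 0 := by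
    have h := pvSegs_eq_splitRaw depth text.toList text.toList 0 0 (-1) (by simp) (by simp)
    simpa using h
  rw [hseg]
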